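-- pv_equiv track=rewrite | github.com/sgalpha01/IIITH-Assignments | Monsoon 21/Bioinformatics/Assignment 1/q3.py | recog_sites
-- ===== SOURCE A (Python) =====
-- def recog_sites(dna_seq, lengths=[6]):
--     compliment_map = {"A": "T", "C": "G", "G": "C", "T": "A"}
--     restriction_sites = []
--     for i in range(len(dna_seq) - 3):
--         for curr_len in lengths:
--             is_site = True
--             for j in range(curr_len // 2):
--                 try:
--                     if dna_seq[i + j] != compliment_map[dna_seq[i + curr_len - j - 1]]:
--                         is_site = False
--                         break
--                 except (KeyError, IndexError):
--                     is_site = False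
--                     continue
--
--             if is_site:
--                 restriction_sites.append(i)
--
--     return restriction_sites
-- ===== SOURCE B (Python) =====
-- def recog_sites(dna_seq, lengths=[6]):
--     comp = {"A": "T", "C": "G", "G": "C", "T": "A"}
--     n = len(dna_seq)
--
--     # pair (p, q) is good iff both indices are in range, dna_seq[q] has a
--     # complement and dna_seq[p] equals it
--     def good(p, q):
--         return 0 <= p and q < n and dna_seq[p] == comp.get(dna_seq[q], None)
--
--     # maximal reverse-complement radius around a center: largest r such that
--     # good(c-k, c+k-1+off) for all 1 <= k <= r (off=0: even site, off=1: odd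
--     # site whose middle character is unconstrained)
--     def radius(c, off):
--         r = 0
--         while good(c - r - 1, c + r + off):
--             r += 1
--         return r
--
--     r_even = [radius(c, 0) for c in range(n + 1)]
--     r_odd = [radius(m, 1) for m in range(n)]
--
--     out = []
--     for i in range(n - 3):
--         for L in lengths:
--             h = L // 2
--             if h <= 0:
--                 out.append(i)
--             elif L % 2 == 0:
--                 if i + h <= n and r_even[i + h] >= h:
--                     out.append(i)
--             else:
--                 if i + h < n and r_odd[i + h] >= h:
--                     out.append(i)
--     return out
-- ===== Notes on version B (the rewrite author's own statement) =====
-- stated objective: faster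
-- what changed: B precomputes, by center expansion, the maximal reverse-complement palindrome radius at every even and odd center once, and answers each (position, length) query with a single O(1) radius comparison, instead of A's re-scanning length//2 character pairs (and swallowing out-of-range lookups one by one) for every position-length combination.
import Mathlib
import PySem

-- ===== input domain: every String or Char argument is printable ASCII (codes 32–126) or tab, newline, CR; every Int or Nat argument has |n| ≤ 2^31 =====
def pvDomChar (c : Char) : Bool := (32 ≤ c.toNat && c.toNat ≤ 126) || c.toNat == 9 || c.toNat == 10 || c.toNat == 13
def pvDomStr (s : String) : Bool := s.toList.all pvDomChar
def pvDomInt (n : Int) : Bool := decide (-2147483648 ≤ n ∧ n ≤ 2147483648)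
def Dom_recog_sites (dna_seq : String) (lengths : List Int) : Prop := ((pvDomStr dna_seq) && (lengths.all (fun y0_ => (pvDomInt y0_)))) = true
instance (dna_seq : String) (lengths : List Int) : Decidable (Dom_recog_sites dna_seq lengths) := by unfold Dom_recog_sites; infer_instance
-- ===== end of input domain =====

-- B replaces A's per-(i,length) half-site rescans by precomputed maximal
-- reverse-complement radii around every center, answering each (i,length)
-- query by one radius comparison (objective: alternative/faster on many or
-- long lengths).

-- ===== PORT A =====
-- complement table used by both ports (the same literal dict in Source A and Source B)
def pvComp : PySem.Dict Char Char :=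
  PySem.Dict.ofList [('A', 'T'), ('C', 'G'), ('G', 'C'), ('T', 'A')]

-- the inner `for j in range(curr_len // 2)` loop of A, with its is_site flag:
-- fuel counts the remaining iterations, j is the current index; the three
-- `none` branches are Python's except (IndexError/KeyError): set flag, continue;
-- a mismatch sets the flag and breaks.
def pvAJLoop (s : String) (i L : Int) : Nat → Int → Bool → Bool
  | 0, _, flag => flag
  | fuel + 1, j, flag =>
    match PySem.Str.pyGet? s (i + j) with
    | none => pvAJLoop s i L fuel (j + 1) false
    | some lch =>
      match PySem.Str.pyGet? s (i + L - j - 1) with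
      | none => pvAJLoop s i L fuel (j + 1) false
      | some rch =>
        match pvComp.get? rch with
        | none => pvAJLoop s i L fuel (j + 1) false
        | some c => if lch ≠ c then false else pvAJLoop s i L fuel (j + 1) flag

def recog_sites (dna_seq : String) (lengths : List Int) : List Int :=
  (PySem.List.pyRange 0 (PySem.Str.len dna_seq - 3) 1).foldl (fun acc i =>
    lengths.foldl (fun acc curr_len =>
      let is_site := pvAJLoop dna_seq i curr_len (PySem.Int.floordiv curr_len 2).toNat 0 true
      if is_site then acc ++ [i] else acc) acc) []

-- ===== PORT B =====
-- (B's complement table is the same literal dict; it shares the definition pvComp)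

-- good(p, q) of Source B
def pvGood (s : String) (n p q : Int) : Bool :=
  decide (0 ≤ p) && decide (q < n) &&
    (match PySem.Str.pyGet? s q with
     | none => false
     | some rch =>
       match pvComp.get? rch with
       | none => false          -- comp.get(..) is None; char == None is False
       | some c => PySem.Str.pyGet? s p == some c)

-- radius(c, off) of Source B: the while loop as fuel recursion; good fails as soon
-- as c - r - 1 < 0, so fuel c.toNat + 1 is always enough
def pvRadius (s : String) (n c off : Int) : Nat → Int → Int
  | 0, r => r
  | fuel + 1, r =>
    if pvGood s n (c - r - 1) (c + r + off) then pvRadius s n c off fuel (r + 1) else r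

def recog_sites_alt (dna_seq : String) (lengths : List Int) : List Int :=
  let n := PySem.Str.len dna_seq
  let rEven := (PySem.List.pyRange 0 (n + 1) 1).map (fun c => pvRadius dna_seq n c 0 (c.toNat + 1) 0)
  let rOdd := (PySem.List.pyRange 0 n 1).map (fun m => pvRadius dna_seq n m 1 (m.toNat + 1) 0)
  (PySem.List.pyRange 0 (n - 3) 1).foldl (fun acc i =>
    lengths.foldl (fun acc L =>
      let h := PySem.Int.floordiv L 2
      if h ≤ 0 then acc ++ [i]
      else if PySem.Int.mod L 2 = 0 then
        if i + h ≤ n ∧ h ≤ PySem.List.pyGetD rEven (i + h) 0 then acc ++ [i] else acc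
      else
        if i + h < n ∧ h ≤ PySem.List.pyGetD rOdd (i + h) 0 then acc ++ [i] else acc) acc) []

-- ===== PRECONDITION & SPEC =====
def Spec_recog_sites (dna_seq : String) (lengths : List Int) (out : List Int) : Prop := out = recog_sites_alt dna_seq lengths
instance (dna_seq : String) (lengths : List Int) (out : List Int) : Decidable (Spec_recog_sites dna_seq lengths out) := by unfold Spec_recog_sites; infer_instance

-- ===== CLAIM (what is proved, stated in full; the proofs are below) =====
def Claim_equal_recog_sites : Prop := ∀ (dna_seq : String) (lengths : List Int), Dom_recog_sites dna_seq lengths → Spec_recog_sites dna_seq lengths (recog_sites dna_seq lengths)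

-- ===== LEMMAS AND PROOFS =====

-- the one-pair check A performs at indices (p, q) = (i+j, i+L-j-1)
def pvPairChk (s : String) (p q : Int) : Bool :=
  match PySem.Str.pyGet? s p with
  | none => false
  | some lch =>
    match PySem.Str.pyGet? s q with
    | none => false
    | some rch =>
      match pvComp.get? rch with
      | none => false
      | some c => lch == c

theorem pvAJLoop_false (s : String) (i L : Int) (fuel : Nat) (j : Int) :
    pvAJLoop s i L fuel j false = false := by
  induction fuel generalizing j with
  | zero => rfl
  | succ f ih =>
    simp only [pvAJLoop]
    rcases hp : PySem.Str.pyGet? s (i + j) with _ | lch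
    · exact ih _
    simp only []
    rcases hq : PySem.Str.pyGet? s (i + L - j - 1) with _ | rch
    · exact ih _
    simp only []
    rcases hc : pvComp.get? rch with _ | c
    · exact ih _
    simp only []
    split
    · rfl
    · exact ih _

theorem pvAJLoop_true_iff (s : String) (i L : Int) :
    ∀ (fuel : Nat) (j : Int),
      (pvAJLoop s i L fuel j true = true ↔
        ∀ k : Nat, k < fuel → pvPairChk s (i + (j + k)) (i + L - (j + k) - 1) = true)
  | 0, j => by simp [pvAJLoop]
  | fuel + 1, j => by
    simp only [pvAJLoop]
    rcases hp : PySem.Str.pyGet? s (i + j) with _ | lch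
    · simp only [pvAJLoop_false]
      constructor
      · intro h; cases h
      · intro h
        have h0 := h 0 (by omega)
        rw [show i + (j + ((0 : Nat) : Int)) = i + j by push_cast; ring] at h0
        have hp' : PySem.List.pyGet? s.toList (i + j) = none := hp
        simp [pvPairChk, hp'] at h0
    simp only []
    rcases hq : PySem.Str.pyGet? s (i + L - j - 1) with _ | rch
    · simp only [pvAJLoop_false]
      constructor
      · intro h; cases h
      · intro h
        have h0 := h 0 (by omega)
        rw [show i + (j + ((0 : Nat) : Int)) = i + j by push_cast; ring,
            show i + L - (j + ((0 : Nat) : Int)) - 1 = i + L - j - 1 by push_cast; ring] at h0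
        have hp' : PySem.List.pyGet? s.toList (i + j) = some lch := hp
        have hq' : PySem.List.pyGet? s.toList (i + L - j - 1) = none := hq
        simp [pvPairChk, hp', hq'] at h0
    simp only []
    rcases hc : pvComp.get? rch with _ | c
    · simp only [pvAJLoop_false]
      constructor
      · intro h; cases h
      · intro h
        have h0 := h 0 (by omega)
        rw [show i + (j + ((0 : Nat) : Int)) = i + j by push_cast; ring,
            show i + L - (j + ((0 : Nat) : Int)) - 1 = i + L - j - 1 by push_cast; ring] at h0
        have hp' : PySem.List.pyGet? s.toList (i + j) = some lch := hp
        have hq' : PySem.List.pyGet? s.toList (i + L - j - 1) = some rch := hq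
        simp [pvPairChk, hp', hq', hc] at h0
    simp only []
    by_cases hlc : lch = c
    · rw [if_neg (by simp [hlc])]
      rw [pvAJLoop_true_iff s i L fuel (j + 1)]
      constructor
      · intro H k hk
        cases k with
        | zero =>
          rw [show i + (j + ((0 : Nat) : Int)) = i + j by push_cast; ring,
              show i + L - (j + ((0 : Nat) : Int)) - 1 = i + L - j - 1 by push_cast; ring]
          have hp' : PySem.List.pyGet? s.toList (i + j) = some lch := hp
          have hq' : PySem.List.pyGet? s.toList (i + L - j - 1) = some rch := hq
          simp [pvPairChk, hp', hq', hc, hlc]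
        | succ k' =>
          have hx := H k' (by omega)
          rw [show i + (j + 1 + (k' : Int)) = i + (j + ((k' + 1 : Nat) : Int)) by push_cast; ring,
              show i + L - (j + 1 + (k' : Int)) - 1 = i + L - (j + ((k' + 1 : Nat) : Int)) - 1 by
                push_cast; ring] at hx
          exact hx
      · intro H k hk
        have hx := H (k + 1) (by omega)
        rw [show i + (j + ((k + 1 : Nat) : Int)) = i + (j + 1 + (k : Int)) by push_cast; ring,
            show i + L - (j + ((k + 1 : Nat) : Int)) - 1 = i + L - (j + 1 + (k : Int)) - 1 by
              push_cast; ring] at hx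
        exact hx
    · rw [if_pos hlc]
      constructor
      · intro h; cases h
      · intro h
        have h0 := h 0 (by omega)
        rw [show i + (j + ((0 : Nat) : Int)) = i + j by push_cast; ring,
            show i + L - (j + ((0 : Nat) : Int)) - 1 = i + L - j - 1 by push_cast; ring] at h0
        have hp' : PySem.List.pyGet? s.toList (i + j) = some lch := hp
        have hq' : PySem.List.pyGet? s.toList (i + L - j - 1) = some rch := hq
        simp [pvPairChk, hp', hq', hc] at h0
        exact (hlc h0).elim

theorem pvStrGet_none (s : String) (q : Int) (h1 : PySem.Str.len s ≤ q) :
    PySem.Str.pyGet? s q = none := by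
  have hl : PySem.Str.len s = (s.toList.length : Int) := PySem.Str.len_eq s
  show PySem.List.pyGet? s.toList q = none
  rw [PySem.List.pyGet?_eq_none_iff]
  intro hIn
  rcases hIn with ⟨_, h2⟩
  omega

theorem pvChk_false_of_big (s : String) (p q : Int) (h1 : PySem.Str.len s ≤ q) :
    pvPairChk s p q = false := by
  have hq' : PySem.List.pyGet? s.toList q = none := pvStrGet_none s q h1
  unfold pvPairChk
  simp only [PySem.Str.pyGet?, PySem.Chars.pyGet?]
  rcases PySem.List.pyGet? s.toList p with _ | lch
  · rfl
  · simp [hq']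

theorem pvPairChk_eq_good (s : String) (p q : Int) (hp : 0 ≤ p) (hq : 0 ≤ q) :
    pvPairChk s p q = pvGood s (PySem.Str.len s) p q := by
  have hl : PySem.Str.len s = (s.toList.length : Int) := PySem.Str.len_eq s
  unfold pvPairChk pvGood
  simp only [PySem.Str.pyGet?, PySem.Chars.pyGet?]
  by_cases hqn : q < PySem.Str.len s
  · have hQ : PySem.List.pyGet? s.toList q = some (s.toList[q.toNat]) :=
      PySem.List.pyGet?_eq_some_getElem s.toList hq (by omega)
    rw [hQ, decide_eq_true hqn, decide_eq_true hp]
    simp only [Bool.true_and]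
    rcases hc : pvComp.get? (s.toList[q.toNat]) with _ | c <;>
      rcases hP : PySem.List.pyGet? s.toList p with _ | lch <;> simp
  · have hQ : PySem.List.pyGet? s.toList q = none := by
      rw [PySem.List.pyGet?_eq_none_iff]
      rintro ⟨-, h2⟩
      omega
    rw [hQ, decide_eq_false hqn]
    simp only [Bool.and_false]
    rcases hP : PySem.List.pyGet? s.toList p with _ | lch <;> simp

theorem pvGood_nonneg_left (s : String) (n p q : Int) (h : pvGood s n p q = true) : 0 ≤ p := by
  unfold pvGood at h
  simp only [Bool.and_eq_true, decide_eq_true_eq] at h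
  exact h.1.1

theorem pvRadius_inv (s : String) (n c off : Int) :
    ∀ (fuel : Nat) (r : Int), 0 ≤ r → r ≤ c → c + 1 ≤ r + fuel →
      (∀ k : Int, 1 ≤ k → k ≤ r → pvGood s n (c - k) (c + k - 1 + off) = true) →
      (r ≤ pvRadius s n c off fuel r ∧
       (∀ k : Int, 1 ≤ k → k ≤ pvRadius s n c off fuel r →
          pvGood s n (c - k) (c + k - 1 + off) = true) ∧
       pvGood s n (c - pvRadius s n c off fuel r - 1)
         (c + pvRadius s n c off fuel r + off) = false)
  | 0, r => by intro h0 h1 h2 _; omega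
  | fuel + 1, r => by
    intro h0 h1 h2 hinv
    simp only [pvRadius]
    by_cases hg : pvGood s n (c - r - 1) (c + r + off) = true
    · rw [if_pos hg]
      have hr1 : r + 1 ≤ c := by
        have := pvGood_nonneg_left s n _ _ hg
        omega
      have hinv' : ∀ k : Int, 1 ≤ k → k ≤ r + 1 → pvGood s n (c - k) (c + k - 1 + off) = true := by
        intro k hk1 hk2
        by_cases hk : k ≤ r
        · exact hinv k hk1 hk
        · have hkr : k = r + 1 := by omega
          subst hkr
          rw [show c - (r + 1) = c - r - 1 by ring, show c + (r + 1) - 1 + off = c + r + off by ring]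
          exact hg
      have := pvRadius_inv s n c off fuel (r + 1) (by omega) hr1 (by omega) hinv'
      exact ⟨by omega, this.2.1, this.2.2⟩
    · rw [if_neg hg]
      refine ⟨le_refl r, hinv, ?_⟩
      rw [show c - r - 1 = c - r - 1 by ring]
      exact Bool.eq_false_iff.mpr hg

theorem pvRadius_le_iff (s : String) (n c off : Int) (hc : 0 ≤ c) (h : Int) :
    h ≤ pvRadius s n c off (c.toNat + 1) 0 ↔
      ∀ k : Int, 1 ≤ k → k ≤ h → pvGood s n (c - k) (c + k - 1 + off) = true := by
  have H := pvRadius_inv s n c off (c.toNat + 1) 0 (le_refl 0) hc (by omega) (by omega)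
  obtain ⟨h1, h2, h3⟩ := H
  constructor
  · intro hle k hk1 hk2
    exact h2 k hk1 (by omega)
  · intro hall
    by_contra hlt
    rw [not_le] at hlt
    have := hall (pvRadius s n c off (c.toNat + 1) 0 + 1) (by omega) (by omega)
    rw [show c - (pvRadius s n c off (c.toNat + 1) 0 + 1) =
          c - pvRadius s n c off (c.toNat + 1) 0 - 1 by ring,
        show c + (pvRadius s n c off (c.toNat + 1) 0 + 1) - 1 + off =
          c + pvRadius s n c off (c.toNat + 1) 0 + off by ring] at this
    rw [h3] at this
    cases this

-- the precomputed radius tables of B, as standalone values (definitionally the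
-- let-bound lists inside recog_sites_alt)
def pvRE (s : String) : List Int :=
  (PySem.List.pyRange 0 (PySem.Str.len s + 1) 1).map
    (fun c => pvRadius s (PySem.Str.len s) c 0 (c.toNat + 1) 0)

def pvRO (s : String) : List Int :=
  (PySem.List.pyRange 0 (PySem.Str.len s) 1).map
    (fun m => pvRadius s (PySem.Str.len s) m 1 (m.toNat + 1) 0)

-- even-length case: A's half-scan succeeds iff B's table guard + lookup succeed
theorem pvEvenCase (s : String) (i L h : Int) (hi : 0 ≤ i) (hh : 0 < h) (hL : L = 2 * h) :
    ((∀ k : Nat, k < h.toNat → pvPairChk s (i + (0 + k)) (i + L - (0 + k) - 1) = true) ↔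
      (i + h ≤ PySem.Str.len s ∧ h ≤ PySem.List.pyGetD (pvRE s) (i + h) 0)) := by
  by_cases hcn : i + h ≤ PySem.Str.len s
  · have hget : PySem.List.pyGetD (pvRE s) (i + h) 0 =
        pvRadius s (PySem.Str.len s) (i + h) 0 ((i + h).toNat + 1) 0 := by
      unfold pvRE
      exact PySem.List.pyGetD_map_pyRange_of_nonneg _ _ _ _ (by omega) (by omega)
    rw [hget, pvRadius_le_iff s _ (i + h) 0 (by omega) h]
    constructor
    · intro H
      refine ⟨hcn, ?_⟩
      intro k hk1 hk2
      have hx := H (h - k).toNat (by omega)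
      rw [show i + (0 + (((h - k).toNat : Nat) : Int)) = i + h - k by omega,
          show i + L - (0 + (((h - k).toNat : Nat) : Int)) - 1 = i + h + k - 1 by omega] at hx
      rw [show (i + h) - k = i + h - k by ring, show i + h + k - 1 + 0 = i + h + k - 1 by ring]
      rw [← pvPairChk_eq_good s _ _ (by omega) (by omega)]
      exact hx
    · rintro ⟨-, H⟩
      intro k hk
      have hx := H (h - k) (by omega) (by omega)
      rw [show i + h - (h - (k : Int)) = i + k by ring,
          show i + h + (h - (k : Int)) - 1 + 0 = i + L - k - 1 by rw [hL]; ring] at hx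
      rw [← pvPairChk_eq_good s _ _ (by omega) (by omega)] at hx
      rw [show i + (0 + (k : Int)) = i + k by ring,
          show i + L - (0 + (k : Int)) - 1 = i + L - k - 1 by ring]
      exact hx
  · constructor
    · intro H
      exfalso
      have hx := H (h.toNat - 1) (by omega)
      rw [show i + L - (0 + (((h.toNat - 1 : Nat)) : Int)) - 1 = i + h by omega] at hx
      rw [pvChk_false_of_big s _ (i + h) (by omega)] at hx
      cases hx
    · rintro ⟨h1, -⟩
      exact absurd h1 hcn

-- odd-length case
theorem pvOddCase (s : String) (i L h : Int) (hi : 0 ≤ i) (hh : 0 < h) (hL : L = 2 * h + 1) :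
    ((∀ k : Nat, k < h.toNat → pvPairChk s (i + (0 + k)) (i + L - (0 + k) - 1) = true) ↔
      (i + h < PySem.Str.len s ∧ h ≤ PySem.List.pyGetD (pvRO s) (i + h) 0)) := by
  by_cases hcn : i + h < PySem.Str.len s
  · have hget : PySem.List.pyGetD (pvRO s) (i + h) 0 =
        pvRadius s (PySem.Str.len s) (i + h) 1 ((i + h).toNat + 1) 0 := by
      unfold pvRO
      exact PySem.List.pyGetD_map_pyRange_of_nonneg _ _ _ _ (by omega) (by omega)
    rw [hget, pvRadius_le_iff s _ (i + h) 1 (by omega) h]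
    constructor
    · intro H
      refine ⟨hcn, ?_⟩
      intro k hk1 hk2
      have hx := H (h - k).toNat (by omega)
      rw [show i + (0 + (((h - k).toNat : Nat) : Int)) = i + h - k by omega,
          show i + L - (0 + (((h - k).toNat : Nat) : Int)) - 1 = i + h + k by omega] at hx
      rw [show (i + h) - k = i + h - k by ring, show i + h + k - 1 + 1 = i + h + k by ring]
      rw [← pvPairChk_eq_good s _ _ (by omega) (by omega)]
      exact hx
    · rintro ⟨-, H⟩
      intro k hk
      have hx := H (h - k) (by omega) (by omega)
      rw [show i + h - (h - (k : Int)) = i + k by ring,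
          show i + h + (h - (k : Int)) - 1 + 1 = i + L - k - 1 by rw [hL]; ring] at hx
      rw [← pvPairChk_eq_good s _ _ (by omega) (by omega)] at hx
      rw [show i + (0 + (k : Int)) = i + k by ring,
          show i + L - (0 + (k : Int)) - 1 = i + L - k - 1 by ring]
      exact hx
  · constructor
    · intro H
      exfalso
      have hx := H (h.toNat - 1) (by omega)
      rw [show i + L - (0 + (((h.toNat - 1 : Nat)) : Int)) - 1 = i + h + 1 by omega] at hx
      rw [pvChk_false_of_big s _ (i + h + 1) (by omega)] at hx
      cases hx
    · rintro ⟨h1, -⟩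
      exact absurd h1 hcn

-- ===== VERDICT (by name: the statement is the Claim_ definition above) =====
theorem recog_sites_spec : Claim_equal_recog_sites := by
  intro s lengths _
  unfold Spec_recog_sites recog_sites recog_sites_alt
  simp only []
  apply PySem.List.foldl_congr_mem
  intro acc i hmem
  have hi : 0 ≤ i := (PySem.List.mem_pyRange_one.mp hmem).1
  apply PySem.List.foldl_congr_mem
  intro acc2 L _
  rw [show List.map (fun c => pvRadius s (PySem.Str.len s) c 0 (c.toNat + 1) 0)
        (PySem.List.pyRange 0 (PySem.Str.len s + 1)) = pvRE s from rfl,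
      show List.map (fun m => pvRadius s (PySem.Str.len s) m 1 (m.toNat + 1) 0)
        (PySem.List.pyRange 0 (PySem.Str.len s)) = pvRO s from rfl]
  by_cases h0 : PySem.Int.floordiv L 2 ≤ 0
  · rw [if_pos h0]
    have ht : (PySem.Int.floordiv L 2).toNat = 0 := by omega
    rw [ht]
    rfl
  · rw [if_neg h0]
    rw [not_le] at h0
    have ht : ((PySem.Int.floordiv L 2).toNat : Int) = PySem.Int.floordiv L 2 := by omega
    have hdm := PySem.Int.floordiv_mul_add_mod L 2
    by_cases hm : PySem.Int.mod L 2 = 0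
    · rw [if_pos hm]
      have hL : L = 2 * PySem.Int.floordiv L 2 := by omega
      have key := (pvAJLoop_true_iff s i L (PySem.Int.floordiv L 2).toNat 0).trans
        (by
          rw [show (∀ k : Nat, k < (PySem.Int.floordiv L 2).toNat →
                pvPairChk s (i + (0 + k)) (i + L - (0 + k) - 1) = true) ↔
              (i + PySem.Int.floordiv L 2 ≤ PySem.Str.len s ∧
               PySem.Int.floordiv L 2 ≤
                 PySem.List.pyGetD (pvRE s) (i + PySem.Int.floordiv L 2) 0) from
            pvEvenCase s i L (PySem.Int.floordiv L 2) hi h0 hL])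
      by_cases hg : i + PySem.Int.floordiv L 2 ≤ PySem.Str.len s ∧
          PySem.Int.floordiv L 2 ≤ PySem.List.pyGetD (pvRE s) (i + PySem.Int.floordiv L 2) 0
      · rw [if_pos (key.mpr hg), if_pos hg]
      · rw [if_neg (fun hA => hg (key.mp hA)), if_neg hg]
    · rw [if_neg hm]
      have hmod1 : PySem.Int.mod L 2 = 1 := by
        have := PySem.Int.mod_nonneg L (by omega : (0:Int) < 2)
        have := PySem.Int.mod_lt L (by omega : (0:Int) < 2)
        omega
      have hL : L = 2 * PySem.Int.floordiv L 2 + 1 := by omega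
      have key := (pvAJLoop_true_iff s i L (PySem.Int.floordiv L 2).toNat 0).trans
        (pvOddCase s i L (PySem.Int.floordiv L 2) hi h0 hL)
      by_cases hg : i + PySem.Int.floordiv L 2 < PySem.Str.len s ∧
          PySem.Int.floordiv L 2 ≤ PySem.List.pyGetD (pvRO s) (i + PySem.Int.floordiv L 2) 0
      · rw [if_pos (key.mpr hg), if_pos hg]
      · rw [if_neg (fun hA => hg (key.mp hA)), if_neg hg]
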